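-- pv_equiv track=rewrite | github.com/Khnaxx/Feu | feu04.py | carre
-- ===== SOURCE A (Python) =====
-- def carre(plateau,deb_x,deb_y):
--     size = 0
--     while True:
--         for i in range(size):
--             for j in range(size):
--                 try:
--                     if plateau[deb_y + i][deb_x + j] == "x":
--                         return i,j,size-1
--                 except : return i,j,size-1
--         size += 1
-- ===== SOURCE B (Python) =====
-- def carre(plateau, deb_x, deb_y):
--     # Per-row strategy: for each row i compute g(i), the first blocking column
--     # (an 'x' or an out-of-range access).  The cell A returns is (i*, g(i*))
--     # where i* is the first row minimising max(i, g(i)), and size-1 is that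
--     # minimum; we keep the running best and stop once i exceeds it.
--     def first_block(i):
--         try:
--             row = plateau[deb_y + i]
--         except Exception:
--             return 0
--         j = 0
--         while True:
--             try:
--                 if row[deb_x + j] == "x":
--                     return j
--             except Exception:
--                 return j
--             j += 1
--
--     best = None  # (m, i, j) with m = max(i, j), smallest m then smallest i
--     i = 0
--     while best is None or i <= best[0]:
--         j = first_block(i)
--         m = max(i, j)
--         if best is None or m < best[0]:
--             best = (m, i, j)
--         i += 1
--     m, bi, bj = best
--     return bi, bj, m
-- ===== Notes on version B (the rewrite author's own statement) =====
-- stated objective: alternative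
-- what changed: Instead of rescanning the whole size-by-size block at every new size, B computes for each row the first blocking column once and returns the first row minimising max(row, first-blocking-column), stopping once the row index exceeds the running minimum.
import Mathlib
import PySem

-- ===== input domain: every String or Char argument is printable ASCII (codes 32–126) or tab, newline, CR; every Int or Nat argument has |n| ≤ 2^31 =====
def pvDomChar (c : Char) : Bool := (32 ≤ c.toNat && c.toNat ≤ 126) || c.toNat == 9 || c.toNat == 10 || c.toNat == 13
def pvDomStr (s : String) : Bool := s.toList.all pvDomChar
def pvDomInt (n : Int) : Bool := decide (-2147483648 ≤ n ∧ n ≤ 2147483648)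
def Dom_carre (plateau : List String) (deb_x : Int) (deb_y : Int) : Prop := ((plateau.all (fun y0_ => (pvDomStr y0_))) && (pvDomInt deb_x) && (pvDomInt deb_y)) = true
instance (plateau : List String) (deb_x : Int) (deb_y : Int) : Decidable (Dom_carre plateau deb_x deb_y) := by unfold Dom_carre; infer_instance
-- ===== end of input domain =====

-- B replaces A's repeated rescans of the growing square by a per-row computation
-- of the first blocking column, taking the first row minimising max(row, col)
-- (objective: a genuinely different algorithm of comparable cost).

-- ===== PORT A =====
-- A's inner check: `plateau[deb_y+i][deb_x+j] == "x"` inside try/except;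
-- none from pyGet? = the Python exception (the except branch also returns).
def pvBlocked (plateau : List String) (deb_x : Int) (deb_y : Int) (i j : Nat) : Bool :=
  match PySem.List.pyGet? plateau (deb_y + (i : Int)) with
  | none => true
  | some row =>
    match PySem.Str.pyGet? row (deb_x + (j : Int)) with
    | none => true
    | some c => c == 'x'

-- A's `for i in range(size): for j in range(size): …` with early return
def pvFullScan (plateau : List String) (deb_x : Int) (deb_y : Int) (size : Nat) : Option (Nat × Nat) :=
  (List.range size).findSome? fun i =>
    (List.range size).findSome? fun j =>
      if pvBlocked plateau deb_x deb_y i j then some (i, j) else none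

-- A's `while True:` loop over size; the fuel only makes the loop total, its
-- exhaustion branch is never reached (a row index out of range always blocks).
def pvLoopA (plateau : List String) (deb_x : Int) (deb_y : Int) : Nat → Nat → Int × Int × Int
  | _, 0 => (0, 0, -1)
  | size, fuel + 1 =>
    match pvFullScan plateau deb_x deb_y size with
    | some (i, j) => ((i : Int), (j : Int), (size : Int) - 1)
    | none => pvLoopA plateau deb_x deb_y (size + 1) fuel

def carre (plateau : List String) (deb_x : Int) (deb_y : Int) : Int × Int × Int :=
  pvLoopA plateau deb_x deb_y 0 (plateau.length + deb_y.natAbs + 3)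

-- ===== PORT B =====
-- B's `first_block(i)` inner `while True` over j; the fuel only makes it total
-- (an out-of-range column, which always exists, stops the scan).
def pvFirstBlockRow (row : String) (deb_x : Int) : Nat → Nat → Nat
  | j, 0 => j
  | j, fuel + 1 =>
    match PySem.Str.pyGet? row (deb_x + (j : Int)) with
    | none => j
    | some c => if c == 'x' then j else pvFirstBlockRow row deb_x (j + 1) fuel

-- B's `first_block(i)`: first blocking column of row i (0 if the row is absent)
def pvFirstBlock (plateau : List String) (deb_x : Int) (deb_y : Int) (i : Nat) : Nat :=
  match PySem.List.pyGet? plateau (deb_y + (i : Int)) with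
  | none => 0
  | some row => pvFirstBlockRow row deb_x 0 (row.length + deb_x.natAbs + 1)

-- B's main `while` loop carrying the running best (m, i, j)
def pvLoopB (plateau : List String) (deb_x : Int) (deb_y : Int) : Nat → Option (Nat × Nat × Nat) → Nat → Int × Int × Int
  | _, none, 0 => (0, 0, -1)
  | _, some (m, bi, bj), 0 => ((bi : Int), (bj : Int), (m : Int))
  | i, best, fuel + 1 =>
    if (match best with | none => true | some (mb, _, _) => i ≤ mb) then
      let j := pvFirstBlock plateau deb_x deb_y i
      let m := max i j
      let best' := match best with
        | none => some (m, i, j)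
        | some (mb, bi, bj) => if m < mb then some (m, i, j) else some (mb, bi, bj)
      pvLoopB plateau deb_x deb_y (i + 1) best' fuel
    else
      match best with
      | none => (0, 0, -1)
      | some (m, bi, bj) => ((bi : Int), (bj : Int), (m : Int))

def carre_alt (plateau : List String) (deb_x : Int) (deb_y : Int) : Int × Int × Int :=
  pvLoopB plateau deb_x deb_y 0 none (pvFirstBlock plateau deb_x deb_y 0 + 2)

-- ===== PRECONDITION & SPEC =====
def Spec_carre (plateau : List String) (deb_x : Int) (deb_y : Int) (out : Int × Int × Int) : Prop := out = carre_alt plateau deb_x deb_y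
instance (plateau : List String) (deb_x : Int) (deb_y : Int) (out : Int × Int × Int) : Decidable (Spec_carre plateau deb_x deb_y out) := by unfold Spec_carre; infer_instance

-- ===== CLAIM (what is proved, stated in full; the proofs are below) =====
def Claim_equal_carre : Prop := ∀ (plateau : List String) (deb_x : Int) (deb_y : Int), Dom_carre plateau deb_x deb_y → Spec_carre plateau deb_x deb_y (carre plateau deb_x deb_y)

-- ===== LEMMAS AND PROOFS =====

-- proof-side abbreviation for B's per-column stop condition on a present row
def pvStop (row : String) (deb_x : Int) (j : Nat) : Bool :=
  match PySem.Str.pyGet? row (deb_x + (j : Int)) with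
  | none => true
  | some c => c == 'x'

-- proof-side abbreviation: the "ring" of the first blocking cell of row i
def pvM (plateau : List String) (deb_x : Int) (deb_y : Int) (i : Nat) : Nat :=
  max i (pvFirstBlock plateau deb_x deb_y i)

-- the characterisation both loops are proved to return
def pvPchar (plateau : List String) (deb_x : Int) (deb_y : Int) (bi bj m : Nat) : Prop :=
  pvFirstBlock plateau deb_x deb_y bi = bj ∧ pvM plateau deb_x deb_y bi = m ∧
  (∀ i, m ≤ pvM plateau deb_x deb_y i) ∧ (∀ i, i < bi → m < pvM plateau deb_x deb_y i)

theorem pvList_oob {α : Type} (xs : List α) (k : Int) (h : (xs.length : Int) ≤ k) :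
    PySem.List.pyGet? xs k = none := by
  rw [PySem.List.pyGet?_eq_none_iff]
  simp [PySem.Raise.InRange]
  omega

theorem pvStr_oob (row : String) (k : Int) (h : (row.length : Int) ≤ k) :
    PySem.Str.pyGet? row k = none := by
  simp [PySem.Str.pyGet?]
  exact pvList_oob _ _ (by rw [String.length_toList]; exact h)

theorem pvFBR_step (row : String) (deb_x : Int) (j fuel : Nat) :
    pvFirstBlockRow row deb_x j (fuel + 1) =
      if pvStop row deb_x j then j else pvFirstBlockRow row deb_x (j + 1) fuel := by
  rw [pvFirstBlockRow, pvStop]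
  cases hg : PySem.Str.pyGet? row (deb_x + (j : Int)) with
  | none => simp
  | some c => by_cases hc : (c == 'x') = true <;> simp [hc]

-- spec of B's inner loop: returns the least stopping column
theorem pvFBR_spec (row : String) (deb_x : Int) :
    ∀ (fuel j K : Nat), j ≤ K → K < j + fuel → pvStop row deb_x K = true →
      pvStop row deb_x (pvFirstBlockRow row deb_x j fuel) = true ∧
      j ≤ pvFirstBlockRow row deb_x j fuel ∧
      ∀ k, j ≤ k → k < pvFirstBlockRow row deb_x j fuel → pvStop row deb_x k = false := by
  intro fuel
  induction fuel with
  | zero => intro j K h1 h2 h3; omega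
  | succ fuel ih =>
    intro j K h1 h2 h3
    rw [pvFBR_step]
    by_cases hs : pvStop row deb_x j = true
    · rw [if_pos hs]
      exact ⟨hs, le_refl _, fun k hk1 hk2 => absurd hk1 (by omega)⟩
    · rw [if_neg hs]
      have hKj : j ≠ K := fun e => hs (e ▸ h3)
      obtain ⟨c1, c2, c3⟩ := ih (j + 1) K (by omega) (by omega) h3
      refine ⟨c1, by omega, fun k hk1 hk2 => ?_⟩
      rcases Nat.eq_or_lt_of_le hk1 with he | hlt
      · rw [← he]; exact Bool.not_eq_true _ ▸ (by simpa using hs)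
      · exact c3 k (by omega) hk2

-- G1/G2: the first blocking column blocks, everything before it does not
theorem pvG_spec (plateau : List String) (deb_x deb_y : Int) (i : Nat) :
    pvBlocked plateau deb_x deb_y i (pvFirstBlock plateau deb_x deb_y i) = true ∧
    ∀ j, j < pvFirstBlock plateau deb_x deb_y i → pvBlocked plateau deb_x deb_y i j = false := by
  cases hg : PySem.List.pyGet? plateau (deb_y + (i : Int)) with
  | none =>
    have hg0 : pvFirstBlock plateau deb_x deb_y i = 0 := by rw [pvFirstBlock, hg]
    have hb : pvBlocked plateau deb_x deb_y i 0 = true := by rw [pvBlocked, hg]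
    rw [hg0]
    exact ⟨hb, fun j hj => absurd hj (by omega)⟩
  | some row =>
    have hgr : pvFirstBlock plateau deb_x deb_y i =
        pvFirstBlockRow row deb_x 0 (row.length + deb_x.natAbs + 1) := by
      rw [pvFirstBlock, hg]
    have hbr : ∀ j, pvBlocked plateau deb_x deb_y i j = pvStop row deb_x j := by
      intro j; rw [pvBlocked, hg, pvStop]
    have hstop : pvStop row deb_x (row.length + deb_x.natAbs) = true := by
      rw [pvStop, pvStr_oob row _ (by omega)]
    obtain ⟨c1, _, c3⟩ := pvFBR_spec row deb_x (row.length + deb_x.natAbs + 1) 0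
      (row.length + deb_x.natAbs) (by omega) (by omega) hstop
    rw [hgr]
    exact ⟨(hbr _).trans c1, fun j hj => (hbr j).trans (c3 j (by omega) hj)⟩

-- existence of the characterised answer (least ring, then least row)
theorem pvPex (plateau : List String) (deb_x deb_y : Int) :
    ∃ bi bj m, pvPchar plateau deb_x deb_y bi bj m := by
  have hne : {v | ∃ i, pvM plateau deb_x deb_y i = v}.Nonempty := ⟨pvM plateau deb_x deb_y 0, 0, rfl⟩
  obtain ⟨i0, hi0⟩ := Nat.sInf_mem hne
  have hbiT := Nat.sInf_mem (⟨i0, hi0⟩ : {i | pvM plateau deb_x deb_y i = sInf {v | ∃ i, pvM plateau deb_x deb_y i = v}}.Nonempty)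
  refine ⟨_, _, _, rfl, hbiT, fun i => Nat.sInf_le ⟨i, rfl⟩, fun i hi => ?_⟩
  have h2 : sInf {v | ∃ i, pvM plateau deb_x deb_y i = v} ≤ pvM plateau deb_x deb_y i :=
    Nat.sInf_le ⟨i, rfl⟩
  rcases Nat.eq_or_lt_of_le h2 with he | hl
  · exfalso
    have h3 : sInf {i | pvM plateau deb_x deb_y i = sInf {v | ∃ i, pvM plateau deb_x deb_y i = v}} ≤ i :=
      Nat.sInf_le he.symm
    omega
  · exact hl

-- the minimum ring is bounded by the first surely-absent row
theorem pvM_bound (plateau : List String) (deb_x deb_y : Int) {bi bj m : Nat}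
    (h : pvPchar plateau deb_x deb_y bi bj m) : m ≤ plateau.length + deb_y.natAbs := by
  obtain ⟨-, -, hmin, -⟩ := h
  have hg : pvFirstBlock plateau deb_x deb_y (plateau.length + deb_y.natAbs) = 0 := by
    unfold pvFirstBlock
    rw [pvList_oob _ _ (by omega)]
  have := hmin (plateau.length + deb_y.natAbs)
  rw [pvM, hg] at this
  omega

theorem pvFindSome?_range_first {α : Type} {n t : Nat} {f : Nat → Option α} {v : α}
    (ht : t < n) (hv : f t = some v) (hnone : ∀ k, k < t → f k = none) :
    (List.range n).findSome? f = some v := by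
  have hn : n = t + 1 + (n - (t + 1)) := by omega
  rw [hn, List.range_add, List.findSome?_append, List.range_succ, List.findSome?_append]
  have h1 : (List.range t).findSome? f = none := by
    rw [List.findSome?_eq_none_iff]; intro k hk; exact hnone k (List.mem_range.1 hk)
  rw [h1]
  simp [hv]

theorem pvScan_clean (plateau : List String) (deb_x deb_y : Int) {bi bj m : Nat}
    (h : pvPchar plateau deb_x deb_y bi bj m) {s : Nat} (hs : s ≤ m) :
    pvFullScan plateau deb_x deb_y s = none := by
  obtain ⟨-, -, hmin, -⟩ := h
  rw [pvFullScan, List.findSome?_eq_none_iff]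
  intro i hi
  rw [List.findSome?_eq_none_iff]
  intro j hj
  have hi' := List.mem_range.1 hi
  have hj' := List.mem_range.1 hj
  have hbf : pvBlocked plateau deb_x deb_y i j = false := by
    by_contra hb
    rw [Bool.not_eq_false] at hb
    have hgle : pvFirstBlock plateau deb_x deb_y i ≤ j := by
      by_contra hlt
      rw [(pvG_spec plateau deb_x deb_y i).2 j (by omega)] at hb
      exact Bool.noConfusion hb
    have h1 := hmin i
    rw [pvM] at h1
    omega
  simp [hbf]

theorem pvScan_hit (plateau : List String) (deb_x deb_y : Int) {bi bj m : Nat}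
    (h : pvPchar plateau deb_x deb_y bi bj m) :
    pvFullScan plateau deb_x deb_y (m + 1) = some (bi, bj) := by
  obtain ⟨hgbi, hMbi, hmin, hfirst⟩ := h
  rw [pvM] at hMbi
  rw [pvFullScan]
  refine pvFindSome?_range_first (t := bi) (by omega) ?_ ?_
  · refine pvFindSome?_range_first (t := bj) (by omega) ?_ ?_
    · rw [if_pos (hgbi ▸ (pvG_spec plateau deb_x deb_y bi).1)]
    · intro k hk
      rw [(pvG_spec plateau deb_x deb_y bi).2 k (hgbi ▸ hk)]
      simp
  · intro k hk
    rw [List.findSome?_eq_none_iff]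
    intro j hj
    have hj' := List.mem_range.1 hj
    have hbf : pvBlocked plateau deb_x deb_y k j = false := by
      by_contra hb
      rw [Bool.not_eq_false] at hb
      have hgle : pvFirstBlock plateau deb_x deb_y k ≤ j := by
        by_contra hlt
        rw [(pvG_spec plateau deb_x deb_y k).2 j (by omega)] at hb
        exact Bool.noConfusion hb
      have h1 := hfirst k hk
      rw [pvM] at h1
      omega
    simp [hbf]

theorem pvLoopA_spec (plateau : List String) (deb_x deb_y : Int) {bi bj m : Nat}
    (h : pvPchar plateau deb_x deb_y bi bj m) :
    ∀ fuel s, s ≤ m + 1 → m + 2 ≤ s + fuel →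
      pvLoopA plateau deb_x deb_y s fuel = ((bi : Int), (bj : Int), (m : Int)) := by
  intro fuel
  induction fuel with
  | zero => intro s h1 h2; omega
  | succ fuel ih =>
    intro s h1 h2
    rw [pvLoopA]
    rcases Nat.lt_or_ge s (m + 1) with hs | hs
    · rw [pvScan_clean plateau deb_x deb_y h (by omega)]
      exact ih (s + 1) (by omega) (by omega)
    · have hs' : s = m + 1 := by omega
      subst hs'
      rw [pvScan_hit plateau deb_x deb_y h]
      simp

theorem pvLoopB_step_some (plateau : List String) (deb_x deb_y : Int)
    (i mb bbi bbj fuel : Nat) :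
    pvLoopB plateau deb_x deb_y i (some (mb, bbi, bbj)) (fuel + 1) =
      if i ≤ mb then
        pvLoopB plateau deb_x deb_y (i + 1)
          (if max i (pvFirstBlock plateau deb_x deb_y i) < mb then
             some (max i (pvFirstBlock plateau deb_x deb_y i), i, pvFirstBlock plateau deb_x deb_y i)
           else some (mb, bbi, bbj)) fuel
      else ((bbi : Int), (bbj : Int), (mb : Int)) := by
  rw [pvLoopB]
  by_cases hc : i ≤ mb <;> simp [hc]

theorem pvLoopB_spec (plateau : List String) (deb_x deb_y : Int) {bi bj m : Nat}
    (h : pvPchar plateau deb_x deb_y bi bj m) :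
    ∀ fuel i mb bbi bbj,
      pvFirstBlock plateau deb_x deb_y bbi = bbj → pvM plateau deb_x deb_y bbi = mb →
      bbi < i → i ≤ mb + 1 →
      (∀ i', i' < i → mb ≤ pvM plateau deb_x deb_y i') →
      (∀ i', i' < bbi → mb < pvM plateau deb_x deb_y i') →
      mb + 2 ≤ i + fuel →
      pvLoopB plateau deb_x deb_y i (some (mb, bbi, bbj)) fuel = ((bi : Int), (bj : Int), (m : Int)) := by
  intro fuel
  induction fuel with
  | zero => intro i mb bbi bbj _ _ _ h4 _ _ h7; omega
  | succ fuel ih =>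
    intro i mb bbi bbj h1 h2 h3 h4 h5 h6 h7
    rw [pvLoopB_step_some]
    by_cases hc : i ≤ mb
    · rw [if_pos hc]
      by_cases hlt : max i (pvFirstBlock plateau deb_x deb_y i) < mb
      · rw [if_pos hlt]
        have hMi : pvM plateau deb_x deb_y i = max i (pvFirstBlock plateau deb_x deb_y i) := rfl
        refine ih (i + 1) _ i _ rfl rfl (by omega) (by omega) ?_ ?_ (by omega)
        · intro i' hi'
          rcases Nat.lt_or_ge i' i with hl | hg
          · have := h5 i' hl; omega
          · have : i' = i := by omega
            subst this; omega
        · intro i' hi'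
          have := h5 i' hi'
          omega
      · rw [if_neg hlt]
        refine ih (i + 1) mb bbi bbj h1 h2 (by omega) (by omega) ?_ h6 (by omega)
        intro i' hi'
        rcases Nat.lt_or_ge i' i with hl | hg
        · exact h5 i' hl
        · have : i' = i := by omega
          subst this
          rw [pvM]; omega
    · rw [if_neg hc]
      obtain ⟨hgbi, hMbi, hmin, hfirst⟩ := h
      have hglob : ∀ i', mb ≤ pvM plateau deb_x deb_y i' := by
        intro i'
        rcases Nat.lt_or_ge i' i with hl | hg
        · exact h5 i' hl
        · rw [pvM]; omega
      have hmb : mb = m := by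
        have ha := hglob bi
        have hb := hmin bbi
        omega
      have hbieq : bbi = bi := by
        rcases lt_trichotomy bbi bi with hl | he | hgt
        · have := hfirst bbi hl; omega
        · exact he
        · have := h6 bi hgt; omega
      subst hbieq
      have : bbj = bj := by rw [← h1, hgbi]
      subst this
      rw [hmb]

-- ===== VERDICT (by name: the statement is the Claim_ definition above) =====
theorem carre_spec : Claim_equal_carre := by
  intro plateau deb_x deb_y _
  show carre plateau deb_x deb_y = carre_alt plateau deb_x deb_y
  obtain ⟨bi, bj, m, h⟩ := pvPex plateau deb_x deb_y
  have hA : carre plateau deb_x deb_y = ((bi : Int), (bj : Int), (m : Int)) := by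
    have hb := pvM_bound plateau deb_x deb_y h
    exact pvLoopA_spec plateau deb_x deb_y h _ 0 (by omega) (by omega)
  have hB : carre_alt plateau deb_x deb_y = ((bi : Int), (bj : Int), (m : Int)) := by
    have hstep : carre_alt plateau deb_x deb_y =
        pvLoopB plateau deb_x deb_y 1
          (some (max 0 (pvFirstBlock plateau deb_x deb_y 0), 0, pvFirstBlock plateau deb_x deb_y 0))
          (pvFirstBlock plateau deb_x deb_y 0 + 1) := rfl
    have hz : max 0 (pvFirstBlock plateau deb_x deb_y 0) = pvFirstBlock plateau deb_x deb_y 0 :=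
      Nat.zero_max _
    rw [hstep, hz]
    refine pvLoopB_spec plateau deb_x deb_y h _ 1 _ 0 _ rfl ?_ (by omega) (by omega) ?_ (by omega) (by omega)
    · rw [pvM, hz]
    · intro i' hi'
      have : i' = 0 := by omega
      subst this
      rw [pvM, hz]
  rw [hA, hB]
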